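-- pv_equiv track=rewrite | github.com/Verde1705/erp5 | product/ERP5OOo/OOoUtils.py | _getTableMinimalBounds
-- ===== SOURCE A (Python) =====
-- def _getTableMinimalBounds(table):
--   """
--     Calcul the minimum size of a text table
--   """
--   empty_lines = 0
--   no_more_empty_lines = 0
--
--   # Eliminate all empty cells at the ends of lines and columns
--   for line in range(len(table)-1, -1, -1):
--     empty_cells = 0
--     line_content = table[line]
--     for cell in range(len(line_content)-1, -1, -1):
--       if line_content[cell] in ('', None):
--         empty_cells += 1
--       else:
--         break
--     if (not no_more_empty_lines) and (empty_cells == len(line_content)):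
--       empty_lines += 1
--     else:
--       line_size = len(line_content) - empty_cells
--       table[line] = line_content[:line_size]
--       no_more_empty_lines = 1
--
--   texts_size = len(table) - empty_lines
--   table = table[:texts_size]
--
--   # Determine minimum bounds
--   max_cols = 0
--   for line in range(len(table)):
--     line_content = table[line]
--     if len(line_content) > max_cols:
--       max_cols = len(line_content)
--
--   return { 'width' : max_cols
--          , 'height': len(table)
--          }
-- ===== SOURCE B (Python) =====
-- def _getTableMinimalBounds(table):
--   """
--     Calcul the minimum size of a text table
--   """
--   def trimmed_len(line):
--     # length of the line after removing trailing '' / None cells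
--     n = len(line)
--     while n and line[n-1] in ('', None):
--       n -= 1
--     return n
--
--   # height = 1 + largest line index whose trimmed content is non-empty
--   height = 0
--   for i, line in enumerate(table):
--     if trimmed_len(line):
--       height = i + 1
--
--   # width = widest trimmed line among the kept ones
--   width = 0
--   for line in table[:height]:
--     n = trimmed_len(line)
--     if n > width:
--       width = n
--
--   return { 'width' : width
--          , 'height': height
--          }
-- ===== Notes on version B (the rewrite author's own statement) =====
-- stated objective: simpler
-- what changed: Replaces A's reverse scan with a no_more_empty_lines latch, in-place trimming and list truncation by two read-only forward passes: one computing the height as the last index with non-empty trimmed content, one taking the max trimmed length as the width; B does not mutate the input list (A does, return values are identical).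
import Mathlib
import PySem

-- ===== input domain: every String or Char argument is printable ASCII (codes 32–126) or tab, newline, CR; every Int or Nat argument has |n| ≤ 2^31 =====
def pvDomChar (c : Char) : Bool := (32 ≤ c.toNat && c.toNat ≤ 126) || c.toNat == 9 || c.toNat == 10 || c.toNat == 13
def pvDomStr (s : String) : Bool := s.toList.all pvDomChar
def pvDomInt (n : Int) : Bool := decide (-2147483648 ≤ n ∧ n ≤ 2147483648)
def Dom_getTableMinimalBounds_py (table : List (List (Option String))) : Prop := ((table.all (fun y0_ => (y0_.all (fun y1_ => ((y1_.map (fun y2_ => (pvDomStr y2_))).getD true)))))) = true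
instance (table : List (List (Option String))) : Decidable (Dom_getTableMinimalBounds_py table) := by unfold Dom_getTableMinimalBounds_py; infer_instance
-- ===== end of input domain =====

-- B is a read-only two-pass rewrite (height as last non-trivial line, then width); A mutates `table`
-- in place — the equivalence proved here is about the RETURN value only (B does not mutate).

-- ===== PORT A =====
-- cell in ('', None)
def pvEmptyCell (c : Option String) : Bool := c == some "" || c == none

-- A's inner loop: `for cell in range(len(line)-1, -1, -1): if empty: empty_cells += 1 else: break`,
-- i.e. count from the last cell backwards until the first non-empty one (recursion on the reversed line)
def pvCountTrail : List (Option String) → Nat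
  | [] => 0
  | c :: rest => if pvEmptyCell c then pvCountTrail rest + 1 else 0

-- the body of A's outer `for line in range(len(table)-1, -1, -1)` loop; state = (table, empty_lines, no_more_empty_lines)
def pvStepA (st : List (List (Option String)) × Nat × Bool) (line : Int) :
    List (List (Option String)) × Nat × Bool :=
  let line_content := PySem.List.pyGetD st.1 line []
  let empty_cells := pvCountTrail line_content.reverse
  if (!st.2.2) && (empty_cells == line_content.length) then
    (st.1, st.2.1 + 1, st.2.2)
  else
    (PySem.List.pySetD st.1 line (line_content.take (line_content.length - empty_cells)), st.2.1, true)

def getTableMinimalBounds_py (table : List (List (Option String))) : List (String × Int) :=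
  let st := (PySem.List.pyRange ((table.length : Int) - 1) (-1) (-1)).foldl pvStepA (table, 0, false)
  let texts_size := st.1.length - st.2.1          -- len(table) - empty_lines (the mutated list, same length)
  let table2 := st.1.take texts_size              -- table = table[:texts_size] (texts_size ≥ 0 here)
  let max_cols := (PySem.List.pyRange 0 (table2.length : Int) 1).foldl
      (fun m line => let line_content := PySem.List.pyGetD table2 line []
                     if line_content.length > m then line_content.length else m) 0
  [("width", (max_cols : Int)), ("height", (table2.length : Int))]

-- ===== PORT B =====
-- trimmed_len: `n = len(line); while n and line[n-1] in ('', None): n -= 1; return n` —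
-- exactly the length left after dropping trailing empty cells
def pvTrimmedLen (line : List (Option String)) : Nat :=
  (line.reverse.dropWhile (fun c => c == some "" || c == none)).length

def getTableMinimalBounds_py_alt (table : List (List (Option String))) : List (String × Int) :=
  let height := (PySem.List.enumerate table).foldl
      (fun h p => if pvTrimmedLen p.2 > 0 then p.1 + 1 else h) (0 : Int)
  let width := (PySem.List.slice table none (some height)).foldl
      (fun w line => let n := (pvTrimmedLen line : Int); if n > w then n else w) (0 : Int)
  [("width", width), ("height", height)]

-- ===== PRECONDITION & SPEC =====
def Spec_getTableMinimalBounds_py (table : List (List (Option String))) (out : List (String × Int)) : Prop := out = getTableMinimalBounds_py_alt table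
instance (table : List (List (Option String))) (out : List (String × Int)) : Decidable (Spec_getTableMinimalBounds_py table out) := by unfold Spec_getTableMinimalBounds_py; infer_instance

-- ===== CLAIM (what is proved, stated in full; the proofs are below) =====
def Claim_equal_getTableMinimalBounds_py : Prop := ∀ (table : List (List (Option String))), Dom_getTableMinimalBounds_py table → Spec_getTableMinimalBounds_py table (getTableMinimalBounds_py table)

-- ===== LEMMAS AND PROOFS =====

-- 1 + the largest index of a line with non-empty trimmed content (0 if none)
def pvH : List (List (Option String)) → Nat
  | [] => 0
  | l :: rest => if pvH rest = 0 then (if pvTrimmedLen l > 0 then 1 else 0) else pvH rest + 1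

-- A's trimming of one line
def pvTrim (l : List (Option String)) : List (Option String) :=
  l.take (l.length - pvCountTrail l.reverse)

-- the table after A's loop: first k lines trimmed, the rest untouched
def pvMapTrim (k : Nat) (tbl : List (List (Option String))) : List (List (Option String)) :=
  (tbl.take k).map pvTrim ++ tbl.drop k

lemma pvCountTrail_eq_takeWhile (r : List (Option String)) :
    pvCountTrail r = (r.takeWhile pvEmptyCell).length := by
  induction r with
  | nil => rfl
  | cons c rest ih =>
    simp only [pvCountTrail, List.takeWhile]
    cases h : pvEmptyCell c <;> simp [ih]

lemma pvCountTrail_le (r : List (Option String)) : pvCountTrail r ≤ r.length := by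
  rw [pvCountTrail_eq_takeWhile]
  simpa using (List.takeWhile_sublist (p := pvEmptyCell) (l := r)).length_le

lemma pvTrimmedLen_eq (l : List (Option String)) :
    pvTrimmedLen l = l.length - pvCountTrail l.reverse := by
  have h := congrArg List.length (List.takeWhile_append_dropWhile (p := pvEmptyCell) (l := l.reverse))
  simp only [List.length_append, List.length_reverse] at h
  have : pvTrimmedLen l = (l.reverse.dropWhile pvEmptyCell).length := rfl
  rw [this, pvCountTrail_eq_takeWhile]; omega

lemma pvTrim_length (l : List (Option String)) : (pvTrim l).length = pvTrimmedLen l := by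
  have := pvCountTrail_le l.reverse
  simp only [pvTrim, List.length_take, List.length_reverse] at *
  rw [pvTrimmedLen_eq]; omega

lemma pvH_le (xs : List (List (Option String))) : pvH xs ≤ xs.length := by
  induction xs with
  | nil => simp [pvH]
  | cons l rest ih => simp only [pvH, List.length_cons]; split_ifs <;> omega

lemma pvH_snoc (xs : List (List (Option String))) (x : List (Option String)) :
    pvH (xs ++ [x]) = if pvTrimmedLen x > 0 then xs.length + 1 else pvH xs := by
  induction xs with
  | nil => simp [pvH]
  | cons y ys ih =>
    rw [List.cons_append]
    simp only [pvH, ih, List.length_cons]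
    by_cases hx : pvTrimmedLen x > 0
    · simp [hx]
    · simp only [hx, if_false]

lemma pvMapTrim_set (tbl : List (List (Option String))) (k : Nat) (hk : k < tbl.length) :
    pvMapTrim k (tbl.set k (pvTrim (tbl.getD k []))) = pvMapTrim (k + 1) tbl := by
  have hget : tbl.getD k [] = tbl[k] := List.getD_eq_getElem tbl [] hk
  have h1 : (tbl.set k (pvTrim (tbl.getD k []))).take k = tbl.take k := by
    rw [List.take_set]
    exact List.set_eq_of_length_le (by simp)
  have h2 : (tbl.set k (pvTrim (tbl.getD k []))).drop k
      = pvTrim tbl[k] :: tbl.drop (k + 1) := by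
    rw [List.drop_set, if_neg (lt_irrefl k), Nat.sub_self,
        List.drop_eq_getElem_cons hk, List.set_cons_zero, hget]
  have htake : tbl.take (k + 1) = tbl.take k ++ [tbl[k]] := by
    rw [List.take_add_one]; simp [List.getElem?_eq_getElem hk]
  unfold pvMapTrim
  rw [h1, h2, htake, List.map_append]
  simp

-- A's outer loop once no_more_empty_lines is set: every remaining line gets trimmed in place
lemma foldA_true (k : Nat) : ∀ (tbl : List (List (Option String))) (e : Nat), k ≤ tbl.length →
    (PySem.List.pyRange ((k : Int) - 1) (-1) (-1)).foldl pvStepA (tbl, e, true) =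
      (pvMapTrim k tbl, e, true) := by
  induction k with
  | zero =>
    intro tbl e _
    rw [PySem.List.pyRange_neg_one_eq_nil (by omega)]
    simp [pvMapTrim]
  | succ k ih =>
    intro tbl e hk
    have hcons : PySem.List.pyRange (((k : Nat) + 1 : Int) - 1) (-1) (-1)
        = ((k : Nat) : Int) :: PySem.List.pyRange (((k : Nat) : Int) - 1) (-1) (-1) := by
      have := PySem.List.pyRange_neg_one_cons (a := ((k : Nat) : Int)) (b := -1) (by omega)
      simpa using this
    have hklt : k < tbl.length := by omega
    rw [show (((k + 1 : Nat) : Int) - 1) = (((k : Nat) + 1 : Int) - 1) by push_cast; ring, hcons,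
        List.foldl_cons]
    have hg : PySem.List.pyGetD tbl ((k : Nat) : Int) [] = tbl.getD k [] :=
      PySem.List.pyGetD_natCast ..
    have hstep : pvStepA (tbl, e, true) ((k : Nat) : Int)
        = (tbl.set k (pvTrim (tbl.getD k [])), e, true) := by
      simp only [pvStepA, hg]
      simp [pvTrim]
    rw [hstep, ih _ e (by simp; omega), pvMapTrim_set tbl k hklt]

-- A's outer loop from the top (no_more_empty_lines = 0): counts trailing all-empty lines, then latches
lemma foldA_false (tbl : List (List (Option String))) (k : Nat) : ∀ (e : Nat), k ≤ tbl.length →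
    (PySem.List.pyRange ((k : Int) - 1) (-1) (-1)).foldl pvStepA (tbl, e, false) =
      (if pvH (tbl.take k) = 0 then (tbl, e + k, false)
       else (pvMapTrim (pvH (tbl.take k)) tbl, e + (k - pvH (tbl.take k)), true)) := by
  induction k with
  | zero =>
    intro e _
    rw [PySem.List.pyRange_neg_one_eq_nil (by omega)]
    simp [pvH]
  | succ k ih =>
    intro e hk
    have hklt : k < tbl.length := by omega
    have hcons : PySem.List.pyRange (((k : Nat) + 1 : Int) - 1) (-1) (-1)
        = ((k : Nat) : Int) :: PySem.List.pyRange (((k : Nat) : Int) - 1) (-1) (-1) := by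
      have := PySem.List.pyRange_neg_one_cons (a := ((k : Nat) : Int)) (b := -1) (by omega)
      simpa using this
    rw [show (((k + 1 : Nat) : Int) - 1) = (((k : Nat) + 1 : Int) - 1) by push_cast; ring, hcons,
        List.foldl_cons]
    have hget : tbl.getD k [] = tbl[k] := List.getD_eq_getElem tbl [] hklt
    have htake : tbl.take (k + 1) = tbl.take k ++ [tbl[k]] := by
      rw [List.take_add_one]; simp [List.getElem?_eq_getElem hklt]
    have hlen_take : (tbl.take k).length = k := by simp; omega
    have hH_le : pvH (tbl.take k) ≤ k := by
      have := pvH_le (tbl.take k); omega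
    have hTL : pvTrimmedLen tbl[k] = tbl[k].length - pvCountTrail tbl[k].reverse :=
      pvTrimmedLen_eq _
    have hCT := pvCountTrail_le tbl[k].reverse
    simp only [List.length_reverse] at hCT
    by_cases hc : pvTrimmedLen tbl[k] = 0
    · -- empty line: empty_cells == len, keep counting
      have hg : PySem.List.pyGetD tbl ((k : Nat) : Int) [] = tbl[k] := by
        rw [PySem.List.pyGetD_natCast]; exact hget
      have hstep : pvStepA (tbl, e, false) ((k : Nat) : Int) = (tbl, e + 1, false) := by
        simp only [pvStepA, hg, show pvCountTrail tbl[k].reverse = tbl[k].length from by omega]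
        simp
      rw [hstep, ih (e + 1) (by omega), htake, pvH_snoc]
      have hred : (if pvTrimmedLen tbl[k] > 0 then (List.take k tbl).length + 1
          else pvH (List.take k tbl)) = pvH (List.take k tbl) := if_neg (by omega)
      rw [hred]
      split_ifs with h
      · rw [show e + 1 + k = e + (k + 1) from by omega]
      · rw [show e + 1 + (k - pvH (List.take k tbl)) = e + (k + 1 - pvH (List.take k tbl))
          from by omega]
    · -- non-empty line: trim it and latch no_more_empty_lines
      have hne : pvCountTrail tbl[k].reverse ≠ tbl[k].length := by omega
      have hg : PySem.List.pyGetD tbl ((k : Nat) : Int) [] = tbl[k] := by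
        rw [PySem.List.pyGetD_natCast]; exact hget
      have hb : (pvCountTrail tbl[k].reverse == tbl[k].length) = false :=
        beq_eq_false_iff_ne.mpr hne
      have hstep : pvStepA (tbl, e, false) ((k : Nat) : Int)
          = (tbl.set k (pvTrim (tbl.getD k [])), e, true) := by
        simp only [pvStepA, hg, hb]
        simp [pvTrim, List.getD, List.getElem?_eq_getElem hklt]
      rw [hstep, foldA_true k _ e (by simp; omega), pvMapTrim_set tbl k hklt, htake, pvH_snoc]
      have hred : (if pvTrimmedLen tbl[k] > 0 then (List.take k tbl).length + 1
          else pvH (List.take k tbl)) = k + 1 := by rw [if_pos (by omega), hlen_take]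
      rw [hred, if_neg (Nat.succ_ne_zero k)]
      rw [show e + (k + 1 - (k + 1)) = e from by omega]

-- B's height pass
lemma foldB_height (xs : List (List (Option String))) : ∀ (s h : Int),
    (PySem.List.enumerate xs s).foldl (fun h p => if pvTrimmedLen p.2 > 0 then p.1 + 1 else h) h =
      (if pvH xs = 0 then h else s + pvH xs) := by
  induction xs with
  | nil => intro s h; simp [PySem.List.enumerate_nil, pvH]
  | cons x rest ih =>
    intro s h
    rw [PySem.List.enumerate_cons, List.foldl_cons, ih]
    simp only [pvH]
    by_cases hx : pvTrimmedLen x > 0 <;> by_cases hr : pvH rest = 0 <;>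
      simp [hx, hr] <;> push_cast <;> omega

-- B's width pass computes A's max_cols (Int accumulator vs Nat accumulator)
lemma foldB_width (xs : List (List (Option String))) : ∀ (m : Nat),
    xs.foldl (fun w line => if (pvTrimmedLen line : Int) > w then (pvTrimmedLen line : Int) else w) (m : Int) =
      ((xs.foldl (fun m l => if pvTrimmedLen l > m then pvTrimmedLen l else m) m : Nat) : Int) := by
  induction xs with
  | nil => intro m; rfl
  | cons x rest ih =>
    intro m
    simp only [List.foldl_cons]
    by_cases hx : pvTrimmedLen x > m
    · rw [if_pos (by exact_mod_cast hx), if_pos hx, ih]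
    · rw [if_neg (by exact_mod_cast hx), if_neg hx, ih]

lemma pvMapTrim_length (k : Nat) (tbl : List (List (Option String))) (hk : k ≤ tbl.length) :
    (pvMapTrim k tbl).length = tbl.length := by
  simp [pvMapTrim]; omega

lemma pvMapTrim_take (k : Nat) (tbl : List (List (Option String))) (hk : k ≤ tbl.length) :
    (pvMapTrim k tbl).take k = (tbl.take k).map pvTrim := by
  simp only [pvMapTrim]
  rw [List.take_append_of_le_length (by simpa using hk)]
  rw [List.take_of_length_le (by simp)]

-- ===== VERDICT (by name: the statement is the Claim_ definition above) =====
theorem getTableMinimalBounds_py_spec : Claim_equal_getTableMinimalBounds_py := by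
  intro table _
  show getTableMinimalBounds_py table = getTableMinimalBounds_py_alt table
  unfold getTableMinimalBounds_py getTableMinimalBounds_py_alt
  dsimp only
  have hmain := foldA_false table table.length 0 (le_refl _)
  rw [List.take_length] at hmain
  rw [hmain, foldB_height table 0 0]
  by_cases h0 : pvH table = 0
  · rw [if_pos h0, if_pos h0]
    simp only [zero_add, Nat.sub_self, List.take_zero, List.length_nil, Nat.cast_zero]
    rw [PySem.List.pyRange_one_eq_nil (le_refl 0)]
    rw [show PySem.List.slice table none (some 0) = List.take 0 table from by
      simpa using PySem.List.slice_to_natCast (xs := table) (b := 0)]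
    simp
  · have hle := pvH_le table
    rw [if_neg h0, if_neg h0]
    have hlen : (pvMapTrim (pvH table) table).length = table.length :=
      pvMapTrim_length _ _ hle
    have hts : (pvMapTrim (pvH table) table).length - (0 + (table.length - pvH table))
        = pvH table := by rw [hlen]; omega
    rw [hts, pvMapTrim_take _ _ hle]
    rw [PySem.List.foldl_pyRange_zero_pyGetD' ((table.take (pvH table)).map pvTrim) []
        (fun m line_content => if line_content.length > m then line_content.length else m) 0]
    rw [List.foldl_map]
    simp only [zero_add]
    rw [PySem.List.slice_to_natCast]
    have hw := foldB_width (table.take (pvH table)) 0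
    rw [Nat.cast_zero] at hw
    rw [hw]
    have hfun : (fun (m : Nat) l => if (pvTrim l).length > m then (pvTrim l).length else m)
        = (fun (m : Nat) l => if pvTrimmedLen l > m then pvTrimmedLen l else m) := by
      funext m l; rw [pvTrim_length]
    rw [hfun]
    have hh : (List.map pvTrim (List.take (pvH table) table)).length = pvH table := by
      simp; omega
    rw [hh]
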